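-- pv_equiv track=rewrite | github.com/yashR4J/interview_prep | backtracking/sumSubsets.py | solution
-- ===== SOURCE A (Python) =====
-- def solution(arr, num):
--     if num > sum(arr): return []
--     subsets = []
--     def helper(remaining, idx, seq, arr, subsets):
--         if remaining == 0:
--             subsets.append(seq)
--             return None
--         elif remaining > 0:
--             for i in range(idx, len(arr)):
--                 if remaining-arr[i] >= 0:
--                     helper(remaining-arr[i], i+1, seq + [arr[i]], arr, subsets)
--     helper(num, 0, [], arr, subsets)
--
--     dup_rem = []
--     for subset in subsets:
--         if subset not in dup_rem:
--             dup_rem.append(subset)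
--
--     return dup_rem
-- ===== SOURCE B (Python) =====
-- def solution(arr, num):
--     if num > sum(arr): return []
--
--     # pure take-or-leave recursion on the list structure (no index loop, no mutation)
--     def subs(remaining, rest):
--         if remaining == 0:
--             return [[]]
--         if remaining < 0 or not rest:
--             return []
--         x, tail = rest[0], rest[1:]
--         take = [[x] + t for t in subs(remaining - x, tail)] if remaining - x >= 0 else []
--         return take + subs(remaining, tail)
--
--     found = subs(num, list(arr))
--
--     # first-occurrence dedup in one pass with a seen-set
--     seen = set()
--     out = []
--     for s in found:
--         k = tuple(s)
--         if k not in seen: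
--             seen.add(k)
--             out.append(s)
--     return out
-- ===== Notes on version B (the rewrite author's own statement) =====
-- stated objective: alternative
-- what changed: Replaces the index-based recursive helper that mutates a shared subsets list with a pure take-or-leave structural recursion on the list returning the subsets directly, and replaces the quadratic list-membership dedup with a one-pass seen-set dedup.
import Mathlib
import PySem

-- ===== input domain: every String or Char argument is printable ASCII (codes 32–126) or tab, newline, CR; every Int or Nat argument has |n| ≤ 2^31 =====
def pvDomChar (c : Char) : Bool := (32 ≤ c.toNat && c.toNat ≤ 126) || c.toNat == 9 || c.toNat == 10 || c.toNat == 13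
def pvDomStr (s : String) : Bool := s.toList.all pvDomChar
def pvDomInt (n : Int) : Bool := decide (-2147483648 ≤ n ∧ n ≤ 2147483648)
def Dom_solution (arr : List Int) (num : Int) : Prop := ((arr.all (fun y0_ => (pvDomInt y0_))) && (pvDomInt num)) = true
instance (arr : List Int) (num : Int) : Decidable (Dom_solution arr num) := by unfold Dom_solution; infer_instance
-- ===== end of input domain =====

-- B replaces A's index-based mutating recursion by a pure take-or-leave structural
-- recursion and A's quadratic dedup by a one-pass seen-set dedup (alternative, same cost class).

-- ===== PORT A =====
-- A's recursive helper; fuel bounds the recursion depth (idx only grows), the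
-- top-level call passes arr.length + 1 which is always sufficient.
def helperA (arr : List Int) : Nat → Int → Nat → List Int → List (List Int) → List (List Int)
  | 0, _, _, _, subsets => subsets
  | fuel+1, remaining, idx, seq, subsets =>
    if remaining = 0 then subsets ++ [seq]
    else if remaining > 0 then
      (List.range' idx (arr.length - idx)).foldl
        (fun acc i =>
          if remaining - arr.getD i 0 ≥ 0 then
            helperA arr fuel (remaining - arr.getD i 0) (i+1) (seq ++ [arr.getD i 0]) acc
          else acc)
        subsets
    else subsets

def solution (arr : List Int) (num : Int) : List (List Int) :=
  if num > arr.sum then []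
  else
    let subsets := helperA arr (arr.length + 1) num 0 [] []
    subsets.foldl (fun dup_rem subset => if subset ∈ dup_rem then dup_rem else dup_rem ++ [subset]) []

-- ===== PORT B =====
def subsB : Int → List Int → List (List Int)
  | remaining, rest =>
    if remaining = 0 then [[]]
    else if remaining < 0 then []
    else
      match rest with
      | [] => []
      | x :: tail =>
        (if remaining - x ≥ 0 then (subsB (remaining - x) tail).map (fun t => x :: t) else []) ++
          subsB remaining tail
termination_by _ rest => rest.length

def solution_alt (arr : List Int) (num : Int) : List (List Int) :=
  if num > arr.sum then []
  else
    ((subsB num arr).foldl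
      (fun (p : List (List Int) × PySem.Set (List Int)) s =>
        if PySem.Set.contains p.2 s then p else (p.1 ++ [s], PySem.Set.add p.2 s))
      ([], PySem.Set.empty)).1

-- ===== PRECONDITION & SPEC =====
def Spec_solution (arr : List Int) (num : Int) (out : List (List Int)) : Prop := out = solution_alt arr num
instance (arr : List Int) (num : Int) (out : List (List Int)) : Decidable (Spec_solution arr num out) := by unfold Spec_solution; infer_instance

-- ===== CLAIM (what is proved, stated in full; the proofs are below) =====
def Claim_equal_solution : Prop := ∀ (arr : List Int) (num : Int), Dom_solution arr num → Spec_solution arr num (solution arr num)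

-- ===== LEMMAS AND PROOFS =====

theorem helperA_eq_subsB (arr : List Int) :
    ∀ fuel idx remaining seq acc, idx ≤ arr.length → arr.length - idx < fuel →
      helperA arr fuel remaining idx seq acc
        = acc ++ (subsB remaining (arr.drop idx)).map (fun t => seq ++ t) := by
  intro fuel
  induction fuel with
  | zero => intro idx r seq acc _ h2; omega
  | succ fuel ih =>
    intro idx r seq acc hidx hf
    by_cases h0 : r = 0
    · subst h0
      rw [helperA, subsB.eq_def]
      simp
    · by_cases hpos : r > 0
      · have loop : ∀ k idx acc, idx + k = arr.length → k ≤ fuel →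
            (List.range' idx k).foldl
              (fun acc i =>
                if r - arr.getD i 0 ≥ 0 then
                  helperA arr fuel (r - arr.getD i 0) (i+1) (seq ++ [arr.getD i 0]) acc
                else acc) acc
            = acc ++ (subsB r (arr.drop idx)).map (fun t => seq ++ t) := by
          intro k
          induction k with
          | zero =>
            intro idx acc hk _
            have hd : arr.drop idx = [] := by
              rw [List.drop_eq_nil_iff]; omega
            rw [hd, subsB]
            simp [h0, not_lt.mpr (le_of_lt hpos)]
          | succ k ihk =>
            intro idx acc hk hkf
            have hlt : idx < arr.length := by omega
            have hget : arr.getD idx 0 = arr[idx] := List.getD_eq_getElem arr 0 hlt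
            have hdrop : arr.drop idx = arr[idx] :: arr.drop (idx+1) :=
              List.drop_eq_getElem_cons hlt
            rw [List.range'_succ, List.foldl_cons, hdrop, subsB]
            simp only [h0, if_false, not_lt.mpr (le_of_lt hpos), if_false]
            by_cases hx : r - arr.getD idx 0 ≥ 0
            · rw [if_pos hx, ih (idx+1) (r - arr.getD idx 0) (seq ++ [arr.getD idx 0]) acc
                (by omega) (by omega)]
              rw [ihk (idx+1) _ (by omega) (by omega)]
              rw [if_pos (by rw [← hget]; exact hx)]
              simp [List.getD, List.getElem?_eq_getElem hlt, Function.comp_def,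
                List.append_assoc]
            · rw [if_neg hx]
              rw [ihk (idx+1) acc (by omega) (by omega)]
              rw [if_neg (by rw [← hget]; exact hx)]
              simp
        rw [helperA]
        rw [if_neg h0, if_pos hpos]
        exact loop (arr.length - idx) idx acc (by omega) (by omega)
      · have hneg : r < 0 := by omega
        rw [helperA, if_neg h0, if_neg (by omega), subsB.eq_def]
        simp [h0, hneg]

theorem dedup_eq (l : List (List Int)) :
    ∀ out : List (List Int),
      (l.foldl
        (fun (p : List (List Int) × PySem.Set (List Int)) s =>
          if PySem.Set.contains p.2 s then p else (p.1 ++ [s], PySem.Set.add p.2 s))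
        (out, out)).1
      = l.foldl (fun dup_rem subset => if subset ∈ dup_rem then dup_rem else dup_rem ++ [subset]) out := by
  induction l with
  | nil => intro out; rfl
  | cons s t ih =>
    intro out
    by_cases hm : s ∈ out
    · simpa [List.foldl_cons, PySem.Set.contains, PySem.Set.add, hm] using ih out
    · simpa [List.foldl_cons, PySem.Set.contains, PySem.Set.add, hm] using ih (out ++ [s])

-- ===== VERDICT (by name: the statement is the Claim_ definition above) =====
theorem solution_spec : Claim_equal_solution := by
  intro arr num _
  unfold Spec_solution solution solution_alt
  by_cases h : num > arr.sum
  · simp [h]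
  · simp only [h, if_false]
    rw [helperA_eq_subsB arr (arr.length + 1) 0 num [] [] (Nat.zero_le _) (by omega)]
    rw [← dedup_eq]
    simp [PySem.Set.empty]
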